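-- pv_equiv track=rewrite | github.com/mbezdek/extended-event-modeling | src/utils.py | adjust_n_boundaries
-- ===== SOURCE A (Python) =====
-- def adjust_n_boundaries(boundaries, k=0):
--     """
--     This function count the number of distinct boundary chunks in an array of 0s and 1s. A boundary chunk is defined as an interval whcih starts with a boundary and ends with a boundary and the distances between consecutive boundaries in this interval is smaller than or equal to k.
--     e.g.: if k=1 and the input list is [0, 1, 1, 1, 0, 1, 1, 1, 1, 0], the function would return 2.
--     """
--     flag = 0
--     count = 0
--     for b in boundaries:
--         if b == 1:
--             flag = 1  # flag the first boundary
--             offset = -1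
--         if flag:
--             offset += 1
--             if offset >= k:
--                 count += 1  # if there has been k non-boundary timesteps, count this as a boundary chunk
--                 offset = -1
--                 flag = 0
--     return count
-- ===== SOURCE B (Python) =====
-- def adjust_n_boundaries(boundaries, k=0):
--     # Gap-scan re-implementation: collect indices of 1s in one enumerate pass,
--     # then count adjacent gaps > k, plus one trailing chunk if it fits in the array.
--     positions = []
--     n = 0
--     for i, b in enumerate(boundaries):
--         if b == 1:
--             positions.append(i)
--         n = i + 1
--     count = 0
--     for prev, cur in zip(positions, positions[1:]):
--         if cur - prev > k:
--             count += 1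
--     if positions and positions[-1] + k <= n - 1:
--         count += 1
--     return count
-- ===== Notes on version B (the rewrite author's own statement) =====
-- stated objective: alternative
-- what changed: Replaces A's per-element flag/offset state machine by one enumerate pass collecting the indices of 1s, then a gap scan over adjacent index pairs (count gaps > k, plus one trailing chunk if last_one + k fits in the array).
import Mathlib
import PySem

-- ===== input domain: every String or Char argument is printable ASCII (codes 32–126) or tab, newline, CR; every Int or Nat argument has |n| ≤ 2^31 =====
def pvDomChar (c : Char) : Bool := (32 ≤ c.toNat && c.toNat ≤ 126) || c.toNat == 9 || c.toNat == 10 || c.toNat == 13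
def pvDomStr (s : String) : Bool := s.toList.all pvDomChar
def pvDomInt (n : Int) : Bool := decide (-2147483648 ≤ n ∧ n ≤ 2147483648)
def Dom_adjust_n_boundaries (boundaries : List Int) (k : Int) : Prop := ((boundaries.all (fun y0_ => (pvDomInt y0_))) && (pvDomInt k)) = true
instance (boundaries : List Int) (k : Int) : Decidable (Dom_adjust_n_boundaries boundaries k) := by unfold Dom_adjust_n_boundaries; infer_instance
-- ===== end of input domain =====

-- B replaces A's per-element flag/offset state machine by an index table of the 1-positions plus a gap scan; equal return value on all inputs (no mutation in either version).


-- ===== PORT A =====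
-- loop body of A; state = (flag, offset, count); Python's 'if flag:' is 'flag ≠ 0'.
-- ('offset' is only read after it has been assigned, so initialising it to 0 is unobservable.)
def pvStepA (k : Int) (st : Int × Int × Int) (b : Int) : Int × Int × Int :=
  let st1 := if b == 1 then ((1 : Int), (-1 : Int), st.2.2) else st
  if st1.1 ≠ 0 then
    let off := st1.2.1 + 1
    if off ≥ k then ((0 : Int), (-1 : Int), st1.2.2 + 1)
    else (st1.1, off, st1.2.2)
  else st1

def adjust_n_boundaries (boundaries : List Int) (k : Int) : Int :=
  (boundaries.foldl (pvStepA k) ((0 : Int), (0 : Int), (0 : Int))).2.2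

-- ===== PORT B =====
-- positions[-1] is read under the 'positions ≠ []' guard, so getLast! is exact there.
def adjust_n_boundaries_alt (boundaries : List Int) (k : Int) : Int :=
  let pn := (PySem.List.enumerate boundaries).foldl
      (fun (st : List Int × Int) (ib : Int × Int) =>
        ((if ib.2 == 1 then st.1 ++ [ib.1] else st.1), ib.1 + 1))
      ([], 0)
  let positions := pn.1
  let n := pn.2
  let count := (positions.zip positions.tail).foldl
      (fun (c : Int) pc => if pc.2 - pc.1 > k then c + 1 else c) 0
  if positions ≠ [] ∧ positions.getLast! + k ≤ n - 1 then count + 1 else count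

-- ===== PRECONDITION & SPEC =====
def Spec_adjust_n_boundaries (boundaries : List Int) (k : Int) (out : Int) : Prop := out = adjust_n_boundaries_alt boundaries k
instance (boundaries : List Int) (k : Int) (out : Int) : Decidable (Spec_adjust_n_boundaries boundaries k out) := by unfold Spec_adjust_n_boundaries; infer_instance

-- ===== CLAIM (what is proved, stated in full; the proofs are below) =====
def Claim_equal_adjust_n_boundaries : Prop := ∀ (boundaries : List Int) (k : Int), Dom_adjust_n_boundaries boundaries k → Spec_adjust_n_boundaries boundaries k (adjust_n_boundaries boundaries k)

-- ===== LEMMAS AND PROOFS =====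

-- Reference recursion: value A's loop will still add, given the remaining list and
-- the current (flag, offset) state (none = flag 0, some o = flag 1 with offset o).
def pvR (k : Int) : List Int → Option Int → Int
  | [], _ => 0
  | b :: t, st =>
    if b = 1 then
      (if (0 : Int) ≥ k then 1 + pvR k t none else pvR k t (some 0))
    else
      match st with
      | none => pvR k t none
      | some o => if o + 1 ≥ k then 1 + pvR k t none else pvR k t (some (o + 1))

-- Indices (starting at i) of the 1-entries.
def pvPos : List Int → Int → List Int
  | [], _ => []
  | b :: t, i => if b = 1 then i :: pvPos t (i + 1) else pvPos t (i + 1)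

def pvGaps (k : Int) : List Int → Int
  | [] => 0
  | [_] => 0
  | a :: b :: t => (if b - a > k then 1 else 0) + pvGaps k (b :: t)

def pvCore (k : Int) (ps : List Int) (n : Int) : Int :=
  pvGaps k ps + (if ps ≠ [] ∧ ps.getLast! + k ≤ n - 1 then 1 else 0)

theorem pvA_fold (k : Int) (l : List Int) : ∀ (flag off cnt : Int),
    (l.foldl (pvStepA k) (flag, off, cnt)).2.2
    = cnt + pvR k l (if flag = 0 then none else some off) := by
  induction l with
  | nil => intro flag off cnt; simp [pvR]
  | cons b t ih =>
    intro flag off cnt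
    rw [List.foldl_cons]
    by_cases hb : b = 1
    · subst hb
      by_cases hk : (0 : Int) ≥ k
      · have hstep : pvStepA k (flag, off, cnt) 1 = (0, -1, cnt + 1) := by
          simp [pvStepA]; omega
        rw [hstep, ih]
        simp [pvR, hk]; omega
      · have hstep : pvStepA k (flag, off, cnt) 1 = (1, 0, cnt) := by
          simp [pvStepA]; omega
        rw [hstep, ih]
        simp [pvR, hk]
    · by_cases hf : flag = 0
      · have hstep : pvStepA k (flag, off, cnt) b = (flag, off, cnt) := by
          simp [pvStepA, hb, hf]
        rw [hstep, ih]
        simp [pvR, hb, hf]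
      · by_cases hk : off + 1 ≥ k
        · have hstep : pvStepA k (flag, off, cnt) b = (0, -1, cnt + 1) := by
            simp [pvStepA, hb, hf]; omega
          rw [hstep, ih]
          simp [pvR, hb, hf, hk]; omega
        · have hstep : pvStepA k (flag, off, cnt) b = (flag, off + 1, cnt) := by
            simp [pvStepA, hb, hf]; omega
          rw [hstep, ih]
          simp [pvR, hb, hf, hk]

theorem pvPos_ge (l : List Int) : ∀ (i p : Int), p ∈ pvPos l i → i ≤ p := by
  induction l with
  | nil => intro i p h; simp [pvPos] at h
  | cons b t ih =>
    intro i p h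
    by_cases hb : b = 1
    · simp [pvPos, hb] at h
      rcases h with h | h
      · omega
      · have := ih (i + 1) p h; omega
    · simp [pvPos, hb] at h
      have := ih (i + 1) p h; omega

theorem pvGetLast!_cons_cons (a b : Int) (t : List Int) :
    (a :: b :: t).getLast! = (b :: t).getLast! := by
  simp [List.getLast!, List.getLast]

theorem pvCore_nil (k n : Int) : pvCore k [] n = 0 := by
  simp [pvCore, pvGaps]

theorem pvCore_single (k a n : Int) : pvCore k [a] n = if a + k ≤ n - 1 then 1 else 0 := by
  simp [pvCore, pvGaps, List.getLast!, List.getLast]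

theorem pvCore_cons_cons (k a b n : Int) (t : List Int) :
    pvCore k (a :: b :: t) n = (if b - a > k then 1 else 0) + pvCore k (b :: t) n := by
  simp only [pvCore, pvGaps, pvGetLast!_cons_cons, ne_eq, List.cons_ne_nil,
    not_false_eq_true, true_and]
  split_ifs <;> omega

-- Value pvR adds from state (some o): the possible pre-trigger before the first
-- remaining 1 (at index p, seen from position i), plus the core gap-scan value.
def pvPre (k i o : Int) (ps : List Int) (len : Int) : Int :=
  match ps with
  | [] => if 1 ≤ len ∧ o + len ≥ k then 1 else 0
  | p :: _ => (if p ≠ i ∧ o + (p - i) ≥ k then 1 else 0) + pvCore k ps (i + len)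

-- Main invariant: pvR from either state, on the suffix l whose 1-indices (from i)
-- are pvPos l i, equals the gap-scan value (plus the possible pre-trigger for some o).
theorem pvMain (k : Int) (l : List Int) : ∀ (i : Int),
    (pvR k l none = pvCore k (pvPos l i) (i + l.length)) ∧
    (∀ o : Int, pvR k l (some o) = pvPre k i o (pvPos l i) l.length) := by
  induction l with
  | nil =>
    intro i
    refine ⟨by simp [pvR, pvCore, pvPos, pvGaps], ?_⟩
    intro o
    simp [pvPos, pvR, pvPre]
  | cons b t ih =>
    intro i
    have iht := ih (i + 1)
    have hlen : i + ((b :: t).length : Int) = (i + 1) + (t.length : Int) := by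
      simp; omega
    by_cases hb : b = 1
    · -- head is a 1
      have hpos : pvPos (b :: t) i = i :: pvPos t (i + 1) := by simp [pvPos, hb]
      have key : pvR k (b :: t) none = pvCore k (i :: pvPos t (i+1)) ((i+1) + t.length) := by
        by_cases hk : (0 : Int) ≥ k
        · have h1 : pvR k (b :: t) none = 1 + pvR k t none := by simp [pvR, hb, hk]
          rw [h1, iht.1]
          cases hps : pvPos t (i + 1) with
          | nil =>
            rw [pvCore_nil, pvCore_single]
            split_ifs <;> omega
          | cons p rest =>
            have hge : i + 1 ≤ p := pvPos_ge t (i+1) p (by rw [hps]; exact List.mem_cons_self)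
            rw [pvCore_cons_cons]
            split_ifs <;> omega
        · have h1 : pvR k (b :: t) none = pvR k t (some 0) := by simp [pvR, hb, hk]
          rw [h1, iht.2 0]
          cases hps : pvPos t (i + 1) with
          | nil =>
            simp only [pvPre, pvCore_single]
            split_ifs <;> omega
          | cons p rest =>
            have hge : i + 1 ≤ p := pvPos_ge t (i+1) p (by rw [hps]; exact List.mem_cons_self)
            simp only [pvPre, pvCore_cons_cons]
            split_ifs <;> omega
      refine ⟨?_, ?_⟩
      · rw [key, ← hpos, ← hlen]
      · intro o
        have h2 : pvR k (b :: t) (some o) = pvR k (b :: t) none := by simp [pvR, hb]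
        rw [h2, key, ← hlen, hpos]
        simp [pvPre]
    · -- head is not a 1
      have hpos : pvPos (b :: t) i = pvPos t (i + 1) := by simp [pvPos, hb]
      refine ⟨?_, ?_⟩
      · have h1 : pvR k (b :: t) none = pvR k t none := by simp [pvR, hb]
        rw [h1, iht.1, hpos, hlen]
      · intro o
        rw [hpos]
        by_cases hk : o + 1 ≥ k
        · have h1 : pvR k (b :: t) (some o) = 1 + pvR k t none := by simp [pvR, hb, hk]
          rw [h1, iht.1]
          cases hps : pvPos t (i + 1) with
          | nil =>
            simp only [pvPre, pvCore_nil, List.length_cons, Nat.cast_add, Nat.cast_one]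
            split_ifs <;> omega
          | cons p rest =>
            have hge : i + 1 ≤ p := pvPos_ge t (i+1) p (by rw [hps]; exact List.mem_cons_self)
            simp only [pvPre, List.length_cons, Nat.cast_add, Nat.cast_one]
            have hc : p ≠ i ∧ o + (p - i) ≥ k := ⟨by omega, by omega⟩
            rw [if_pos hc]
            have hn : i + ((t.length : Int) + 1) = i + 1 + (t.length : Int) := by omega
            rw [hn]
        · have h1 : pvR k (b :: t) (some o) = pvR k t (some (o + 1)) := by simp [pvR, hb, hk]
          rw [h1, iht.2 (o + 1)]
          cases hps : pvPos t (i + 1) with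
          | nil =>
            simp only [pvPre, List.length_cons, Nat.cast_add, Nat.cast_one]
            split_ifs <;> omega
          | cons p rest =>
            have hge : i + 1 ≤ p := pvPos_ge t (i+1) p (by rw [hps]; exact List.mem_cons_self)
            simp only [pvPre, List.length_cons, Nat.cast_add, Nat.cast_one]
            have hn : i + 1 + ((t.length : Int)) = i + ((t.length : Int) + 1) := by omega
            rw [hn]
            split_ifs <;> omega

-- The enumerate fold of B builds exactly (pvPos l s, last index + 1).
theorem pvB_fold1 (l : List Int) : ∀ (s : Int) (acc : List Int) (n0 : Int),
    ((PySem.List.enumerate l s).foldl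
      (fun (st : List Int × Int) (ib : Int × Int) =>
        ((if ib.2 == 1 then st.1 ++ [ib.1] else st.1), ib.1 + 1))
      (acc, n0))
    = (acc ++ pvPos l s, if l = [] then n0 else s + l.length) := by
  induction l with
  | nil => intro s acc n0; simp [PySem.List.enumerate_nil, pvPos]
  | cons b t ih =>
    intro s acc n0
    rw [PySem.List.enumerate_cons, List.foldl_cons]
    by_cases hb : b = 1
    · simp only [hb, beq_self_eq_true, if_true]
      rw [ih (s + 1) (acc ++ [s]) (s + 1)]
      simp [pvPos]
      cases t with
      | nil => simp
      | cons c u => simp; omega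
    · have : (b == 1) = false := by simp [hb]
      simp only [this, Bool.false_eq_true, if_false]
      rw [ih (s + 1) acc (s + 1)]
      simp [pvPos, hb]
      cases t with
      | nil => simp
      | cons c u => simp; omega

-- The zip fold of B counts adjacent gaps > k.
theorem pvB_fold2 (k : Int) (ps : List Int) : ∀ (c : Int),
    ((ps.zip ps.tail).foldl (fun (c : Int) pc => if pc.2 - pc.1 > k then c + 1 else c) c)
    = c + pvGaps k ps := by
  induction ps with
  | nil => intro c; simp [pvGaps]
  | cons a rest ih =>
    intro c
    cases rest with
    | nil => simp [pvGaps]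
    | cons b t =>
      simp only [List.tail_cons, List.zip_cons_cons, List.foldl_cons]
      simp only [List.tail_cons] at ih
      rw [ih]
      simp [pvGaps]
      by_cases hc : b - a > k
      · simp [hc]; omega
      · simp [hc]

-- ===== VERDICT (by name: the statement is the Claim_ definition above) =====
theorem adjust_n_boundaries_spec : Claim_equal_adjust_n_boundaries := by
  intro boundaries k _
  have hA : adjust_n_boundaries boundaries k = pvR k boundaries none := by
    unfold adjust_n_boundaries
    rw [pvA_fold k boundaries 0 0 0]
    norm_num
  have hB : adjust_n_boundaries_alt boundaries k
      = pvCore k (pvPos boundaries 0) (0 + boundaries.length) := by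
    unfold adjust_n_boundaries_alt
    rw [pvB_fold1 boundaries 0 [] 0]
    simp only [List.nil_append]
    rw [pvB_fold2 k (pvPos boundaries 0) 0]
    cases hb : boundaries with
    | nil => simp [pvPos, pvCore, pvGaps]
    | cons x t =>
      rw [if_neg (by simp : ¬(x :: t) = [])]
      simp only [pvCore]
      split_ifs <;> omega
  unfold Spec_adjust_n_boundaries
  rw [hA, hB]
  exact (pvMain k boundaries 0).1
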